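-- pv_equiv track=rewrite | github.com/ksj1999/Practice-K-Empowerment-Software-Bootcamp | day5.py | calucate_fee
-- ===== SOURCE A (Python) =====
-- def calucate_fee(args) -> dict:
--
--     """
--     놀이공원 요금 계산
--     :param args: ages in list
--     :return: 전체 인원 수, 어름 수, 아이 수, 지불할 총 입장료
--     """
--     total = 0
--     adults = 0
--     kids = 0
--     for age in args:
--         if 19 <= age:  # adult
--             total = total + 10000
--             adults= adults + 1
--
--         else:
--             total = total + 3000
--             kids = kids + 1
--     return {'no_of_people' : len(args), 'no_of_adults' : adults,'no_of_kids' : kids, 'total_fee' : total}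
-- ===== SOURCE B (Python) =====
-- def calucate_fee(args) -> dict:
--     # Divide-and-conquer: split the list in half, compute each half's summary
--     # dict recursively, and merge by field-wise addition (depth O(log n)).
--     if len(args) == 0:
--         return {'no_of_people': 0, 'no_of_adults': 0, 'no_of_kids': 0, 'total_fee': 0}
--     if len(args) == 1:
--         adult = args[0] >= 19
--         return {'no_of_people': 1,
--                 'no_of_adults': 1 if adult else 0,
--                 'no_of_kids': 0 if adult else 1,
--                 'total_fee': 10000 if adult else 3000}
--     mid = len(args) // 2
--     left = calucate_fee(args[:mid])
--     right = calucate_fee(args[mid:])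
--     return {k: left[k] + right[k] for k in left}
-- ===== Notes on version B (the rewrite author's own statement) =====
-- stated objective: alternative
-- what changed: B is a divide-and-conquer recursion: it splits the list in half, computes each half's summary dict recursively, and merges the two dicts by field-wise addition, instead of A's single loop carrying three parallel accumulators.
import Mathlib
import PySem

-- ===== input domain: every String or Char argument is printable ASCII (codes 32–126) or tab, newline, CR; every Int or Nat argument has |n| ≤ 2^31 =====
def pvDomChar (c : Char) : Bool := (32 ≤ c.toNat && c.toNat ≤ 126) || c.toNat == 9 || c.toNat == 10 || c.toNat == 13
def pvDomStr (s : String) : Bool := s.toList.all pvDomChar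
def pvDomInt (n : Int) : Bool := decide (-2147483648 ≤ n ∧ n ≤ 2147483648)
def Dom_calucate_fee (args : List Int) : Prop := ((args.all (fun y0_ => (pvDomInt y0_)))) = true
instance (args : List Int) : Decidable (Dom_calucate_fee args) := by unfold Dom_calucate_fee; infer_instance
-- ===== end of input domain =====

-- B is a divide-and-conquer recursion merging half-summaries; A is a single
-- accumulator loop. Equivalence of the returned dict is proved on all inputs.

-- ===== PORT A =====
-- A: one loop accumulating total fee, adult count and kid count in parallel.
def calucate_fee (args : List Int) : List (String × Int) :=
  let st := args.foldl (fun (s : Int × Int × Int) age =>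
    if 19 ≤ age then (s.1 + 10000, s.2.1 + 1, s.2.2)
    else (s.1 + 3000, s.2.1, s.2.2 + 1)) (0, 0, 0)
  [("no_of_people", (args.length : Int)), ("no_of_adults", st.2.1),
   ("no_of_kids", st.2.2), ("total_fee", st.1)]

-- ===== PORT B =====
-- B: split in half, recurse on each half, merge the two dicts field-wise.
-- args[:mid]/args[mid:] with 0 ≤ mid ≤ len are exactly take/drop;
-- left[k] in the merge: the key is always present, so lookup's default 0 is unreachable.
def calucate_fee_alt (args : List Int) : List (String × Int) :=
  if _h0 : args.length = 0 then
    [("no_of_people", 0), ("no_of_adults", 0), ("no_of_kids", 0), ("total_fee", 0)]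
  else if _h1 : args.length = 1 then
    let adult := 19 ≤ args.headI
    [("no_of_people", 1), ("no_of_adults", if adult then 1 else 0),
     ("no_of_kids", if adult then 0 else 1),
     ("total_fee", if adult then 10000 else 3000)]
  else
    let mid := args.length / 2
    let left := calucate_fee_alt (args.take mid)
    let right := calucate_fee_alt (args.drop mid)
    left.map (fun kv => (kv.1, kv.2 + ((right.lookup kv.1).getD 0)))
termination_by args.length
decreasing_by
  · simp only [List.length_take]; omega
  · simp only [List.length_drop]; omega

-- ===== PRECONDITION & SPEC =====
def Spec_calucate_fee (args : List Int) (out : List (String × Int)) : Prop := out = calucate_fee_alt args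
instance (args : List Int) (out : List (String × Int)) : Decidable (Spec_calucate_fee args out) := by unfold Spec_calucate_fee; infer_instance

-- ===== CLAIM =====
def Claim_equal_calucate_fee : Prop := ∀ (args : List Int), Dom_calucate_fee args → Spec_calucate_fee args (calucate_fee args)

-- ===== LEMMAS AND PROOFS =====
def adultsI (args : List Int) : Int := ((args.filter (fun age => 19 ≤ age)).length : Int)

lemma alt_char (args : List Int) :
    calucate_fee_alt args =
      [("no_of_people", (args.length : Int)), ("no_of_adults", adultsI args),
       ("no_of_kids", (args.length : Int) - adultsI args),
       ("total_fee", adultsI args * 10000 + ((args.length : Int) - adultsI args) * 3000)] := by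
  induction args using calucate_fee_alt.induct with
  | case1 args h0 =>
    rw [calucate_fee_alt]
    simp [List.length_eq_zero_iff.mp h0, adultsI]
  | case2 args h0 h1 =>
    obtain ⟨a, rfl⟩ := List.length_eq_one_iff.mp h1
    rw [calucate_fee_alt]
    simp only [h1, if_true, dite_eq_ite, List.headI, adultsI, List.filter]
    by_cases h : 19 ≤ a
    · simp [h]
    · simp [h]
  | case3 args h0 h1 mid ihl ihr =>
    rw [calucate_fee_alt]
    have hsplit : args.take (args.length / 2) ++ args.drop (args.length / 2) = args :=
      List.take_append_drop _ _
    have hlen : (args.take (args.length / 2)).length + (args.drop (args.length / 2)).length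
        = args.length := by
      simp only [List.length_take, List.length_drop]; omega
    have hadd : adultsI args
        = adultsI (args.take (args.length / 2)) + adultsI (args.drop (args.length / 2)) := by
      unfold adultsI
      conv_lhs => rw [← hsplit]
      rw [List.filter_append]
      push_cast [List.length_append]
      ring
    have hm : mid = args.length / 2 := rfl
    rw [hm] at ihl ihr
    have hL : (((args.take (args.length / 2)).length : Int))
        + (((args.drop (args.length / 2)).length : Int)) = (args.length : Int) := by
      exact_mod_cast hlen
    have lk1 : ∀ (p a k t : Int), (List.lookup "no_of_people"
        [("no_of_people", p), ("no_of_adults", a), ("no_of_kids", k), ("total_fee", t)]) = some p :=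
      fun _ _ _ _ => rfl
    have lk2 : ∀ (p a k t : Int), (List.lookup "no_of_adults"
        [("no_of_people", p), ("no_of_adults", a), ("no_of_kids", k), ("total_fee", t)]) = some a :=
      fun _ _ _ _ => rfl
    have lk3 : ∀ (p a k t : Int), (List.lookup "no_of_kids"
        [("no_of_people", p), ("no_of_adults", a), ("no_of_kids", k), ("total_fee", t)]) = some k :=
      fun _ _ _ _ => rfl
    have lk4 : ∀ (p a k t : Int), (List.lookup "total_fee"
        [("no_of_people", p), ("no_of_adults", a), ("no_of_kids", k), ("total_fee", t)]) = some t :=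
      fun _ _ _ _ => rfl
    simp only [dif_neg h0, dif_neg h1, ihl, ihr, List.map_cons, List.map_nil,
      lk1, lk2, lk3, lk4, Option.getD_some, List.cons.injEq, Prod.mk.injEq]
    and_intros <;>
      first
        | trivial
        | exact_mod_cast hlen
        | exact hadd.symm
        | (rw [hadd, ← hL]; ring)
        | linarith [hL, hadd]

lemma fee_fold (args : List Int) (t a k : Int) :
    args.foldl (fun (s : Int × Int × Int) age =>
      if 19 ≤ age then (s.1 + 10000, s.2.1 + 1, s.2.2)
      else (s.1 + 3000, s.2.1, s.2.2 + 1)) (t, a, k)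
    = (t + adultsI args * 10000 + ((args.length : Int) - adultsI args) * 3000,
       a + adultsI args,
       k + ((args.length : Int) - adultsI args)) := by
  induction args generalizing t a k with
  | nil => simp [adultsI]
  | cons x xs ih =>
    simp only [List.foldl_cons, adultsI, List.filter_cons, List.length_cons]
    by_cases h : 19 ≤ x
    · simp only [h, decide_true, if_true, ih, adultsI, Prod.mk.injEq, List.length_cons]
      and_intros <;> (first | trivial | (push_cast; ring))
    · simp only [h, decide_false, if_false, Bool.false_eq_true, ih, adultsI, Prod.mk.injEq]
      and_intros <;> (first | trivial | (push_cast; ring))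

-- ===== VERDICT =====
theorem calucate_fee_spec : Claim_equal_calucate_fee := by
  intro args _
  unfold Spec_calucate_fee calucate_fee
  rw [alt_char, fee_fold]
  norm_num
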